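-- pv_equiv track=rewrite | github.com/Liptee/Baumer100Jetson | tools/baumer_hydra_gui.py | _equal_bands
-- ===== SOURCE A (Python) =====
-- def _equal_bands(length: int, expected: int) -> list[tuple[int, int]]:
--     bands: list[tuple[int, int]] = []
--     step = max(1, length // expected)
--     for i in range(expected):
--         a = i * step
--         b = length if i == expected - 1 else (i + 1) * step
--         if b <= a:
--             b = min(length, a + 1)
--         bands.append((a, b))
--     return bands
-- ===== SOURCE B (Python) =====
-- def _equal_bands(length: int, expected: int) -> list[tuple[int, int]]:
--     step = max(1, length // expected)
--     bounds = [i * step for i in range(expected)] + [length]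
--     return list(zip(bounds, bounds[1:]))
-- ===== Notes on version B (the rewrite author's own statement) =====
-- stated objective: simpler
-- what changed: B computes all cut points once as a boundaries list and pairs adjacent ones with zip, instead of computing each band independently in a loop with an inline correction branch (which is provably a no-op).
import Mathlib
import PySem

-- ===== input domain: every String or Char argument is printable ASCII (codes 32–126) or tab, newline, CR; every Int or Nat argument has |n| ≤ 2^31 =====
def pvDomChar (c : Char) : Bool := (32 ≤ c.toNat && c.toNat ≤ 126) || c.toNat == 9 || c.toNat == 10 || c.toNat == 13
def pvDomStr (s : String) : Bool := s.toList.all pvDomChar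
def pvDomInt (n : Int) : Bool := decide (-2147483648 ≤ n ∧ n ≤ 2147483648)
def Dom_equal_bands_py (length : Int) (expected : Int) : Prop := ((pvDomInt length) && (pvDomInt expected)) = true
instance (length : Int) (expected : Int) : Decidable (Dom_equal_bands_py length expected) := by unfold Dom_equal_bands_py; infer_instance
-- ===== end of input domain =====

-- B replaces A's per-band loop with a boundaries list zipped with its own tail ('simpler'); A's
-- inline correction branch is provably a no-op, which the equivalence proof below establishes.

-- ===== PORT A =====
def equal_bands_py (length : Int) (expected : Int) : List (Int × Int) :=
  let step := max 1 (PySem.Int.floordiv length expected)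
  (PySem.List.pyRange 0 expected 1).foldl
    (fun bands i =>
      let a := i * step
      let b := if i = expected - 1 then length else (i + 1) * step
      let b := if b ≤ a then min length (a + 1) else b
      bands ++ [(a, b)]) []

-- ===== PORT B =====
def equal_bands_py_alt (length : Int) (expected : Int) : List (Int × Int) :=
  let step := max 1 (PySem.Int.floordiv length expected)
  let bounds := (PySem.List.pyRange 0 expected 1).map (fun i => i * step) ++ [length]
  bounds.zip bounds.tail

-- ===== PRECONDITION & SPEC =====
-- Pre_ excludes exactly expected = 0, where Python's 'length // expected' raises ZeroDivisionError.
def Pre_equal_bands_py (length : Int) (expected : Int) : Prop := expected ≠ 0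
instance (length : Int) (expected : Int) : Decidable (Pre_equal_bands_py length expected) := by unfold Pre_equal_bands_py; infer_instance
def pvWitness_equal_bands_py : Int × Int := (10, 3)
def Spec_equal_bands_py (length : Int) (expected : Int) (out : List (Int × Int)) : Prop := out = equal_bands_py_alt length expected
instance (length : Int) (expected : Int) (out : List (Int × Int)) : Decidable (Spec_equal_bands_py length expected out) := by unfold Spec_equal_bands_py; infer_instance

-- ===== CLAIM (what is proved, stated in full; the proofs are below) =====
def Claim_equal_equal_bands_py : Prop := ∀ (length : Int) (expected : Int), Dom_equal_bands_py length expected → Pre_equal_bands_py length expected → Spec_equal_bands_py length expected (equal_bands_py length expected)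

-- ===== LEMMAS AND PROOFS =====

-- A's loop body, with the correction branch shown to be a no-op (step ≥ 1 makes b > a for
-- non-last bands; for the last band min length (a+1) = length whenever length ≤ a).
theorem band_body_simp (length expected step i : Int) (hs : 1 ≤ step) :
    (let a := i * step
     let b := if i = expected - 1 then length else (i + 1) * step
     if b ≤ a then (a, min length (a + 1)) else (a, b))
    = (i * step, if i = expected - 1 then length else (i + 1) * step) := by
  by_cases h : i = expected - 1
  · subst h
    simp only [ite_true]
    by_cases h2 : length ≤ (expected - 1) * step
    · rw [if_pos h2, min_eq_left (by omega : length ≤ (expected - 1) * step + 1)]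
    · rw [if_neg h2]
  · simp only [if_neg h]
    have hgt : ¬ (i + 1) * step ≤ i * step := by nlinarith
    rw [if_neg hgt]

theorem main_eq (length expected : Int) (hpre : expected ≠ 0) :
    equal_bands_py length expected = equal_bands_py_alt length expected := by
  unfold equal_bands_py equal_bands_py_alt
  set step := max 1 (PySem.Int.floordiv length expected) with hstep
  have hs : (1 : Int) ≤ step := le_max_left _ _
  rcases (by omega : expected ≤ 0 ∨ 0 < expected) with h | h
  · rw [PySem.List.pyRange_one_eq_nil h]
    simp
  · -- A's fold appends one pair per i: rewrite it as a map of the simplified body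
    have hA : (PySem.List.pyRange 0 expected 1).foldl
        (fun bands i =>
          let a := i * step
          let b := if i = expected - 1 then length else (i + 1) * step
          let b := if b ≤ a then min length (a + 1) else b
          bands ++ [(a, b)]) []
        = (PySem.List.pyRange 0 expected 1).map
            (fun i => (i * step, if i = expected - 1 then length else (i + 1) * step)) := by
      rw [PySem.List.foldl_append_singleton_eq_map]
      apply List.map_congr_left
      intro i _
      simpa using band_body_simp length expected step i hs
    rw [hA]
    -- compare element-wise with B's zip of boundaries with its tail
    apply List.ext_getElem
    · simp [PySem.List.length_pyRange_one, List.length_zip]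
    · intro k hk1 hk2
      have hlen : ((PySem.List.pyRange 0 expected 1).map (fun i => i * step)).length = (expected).toNat := by
        simp [PySem.List.length_pyRange_one]
      have hkn : k < expected.toNat := by
        simpa [PySem.List.length_pyRange_one] using hk1
      rw [List.getElem_zip]
      rw [List.getElem_tail]
      have hmap : ∀ (j : ℕ) (hj : j < expected.toNat),
          (((PySem.List.pyRange 0 expected 1).map (fun i => i * step)) ++ [length])[j]'(by
            simp [PySem.List.length_pyRange_one]; omega) = (j : Int) * step := by
        intro j hj
        rw [List.getElem_append_left (by simp [PySem.List.length_pyRange_one]; omega)]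
        rw [List.getElem_map, PySem.List.getElem_pyRange_one]
        simp
      have hlast :
          (((PySem.List.pyRange 0 expected 1).map (fun i => i * step)) ++ [length])[expected.toNat]'(by
            simp [PySem.List.length_pyRange_one]) = length := by
        rw [List.getElem_append_right (by simp [PySem.List.length_pyRange_one])]
        simp [PySem.List.length_pyRange_one]
      rw [List.getElem_map, PySem.List.getElem_pyRange_one]
      rcases Nat.lt_or_ge (k+1) expected.toNat with hk3 | hk3
      · have h1 := hmap k hkn
        have h2 := hmap (k+1) hk3
        have hne : (0 : Int) + (k : Int) ≠ expected - 1 := by omega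
        simp only [h1, h2, if_neg hne]
        push_cast
        ring_nf
      · have hkeq : k + 1 = expected.toNat := by omega
        have h1 := hmap k hkn
        have heq : (0 : Int) + (k : Int) = expected - 1 := by omega
        simp only [h1, if_pos heq, hkeq, hlast]
        ring_nf

-- ===== VERDICT (by name: the statement is the Claim_ definition above) =====
theorem equal_bands_py_spec : Claim_equal_equal_bands_py := by
  intro length expected _ hpre
  exact main_eq length expected hpre
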